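-- pv_equiv track=rewrite | github.com/evan-william/personal-project | Logic Exercises/Codeforce Problem Set/Contests/First Contest/First.py | can_make_universal
-- ===== SOURCE A (Python) =====
-- def is_universal(s):
--     """Check if string s is universal (lexicographically smaller than its reversal)"""
--     reversed_s = s[::-1]
--     return s < reversed_s
--
-- def can_make_universal(s, k):
--     n = len(s)
--
--     # If s is already universal, no swaps needed
--     if is_universal(s):
--         return "YES"
--
--     # If k = 0, we can't do any swaps
--     if k == 0:
--         return "NO"
--
--     # Special case for single character strings (like "a")
--     if n == 1:
--         return "NO"  # Always equal to its reversal
--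
--     # Check for palindrome with all identical characters (like "zzz")
--     if s == s[::-1] and len(set(s)) == 1:
--         return "NO"  # No swap will change anything
--
--     # For normal palindromes (like "codeforcesecrofedoc"), we can break symmetry with 1 swap
--     if s == s[::-1] and len(set(s)) > 1:
--         # Find two different characters to swap
--         for i in range(n):
--             for j in range(i+1, n):
--                 if s[i] != s[j]:
--                     # Simulate the swap
--                     s_list = list(s)
--                     s_list[i], s_list[j] = s_list[j], s_list[i]
--                     swapped_s = ''.join(s_list)
--
--                     if is_universal(swapped_s):
--                         return "YES"
--
--     # For non-palindromes, often one swap is enough to make them universal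
--     # Try all possible swaps
--     for i in range(n):
--         for j in range(i+1, n):
--             s_list = list(s)
--             s_list[i], s_list[j] = s_list[j], s_list[i]
--             swapped_s = ''.join(s_list)
--
--             if is_universal(swapped_s):
--                 return "YES"
--
--     return "NO"
-- ===== SOURCE B (Python) =====
-- def can_make_universal(s, k):
--     # Closed form instead of trying swaps: swapping two equal characters changes
--     # nothing, and whenever the string is not already universal but contains two
--     # distinct characters, one suitable swap always exists (swap a minimal
--     # character toward the front / a larger one toward the back).
--     if s < s[::-1]:
--         return "YES"
--     if k == 0:
--         return "NO"
--     return "YES" if len(set(s)) > 1 else "NO"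
-- ===== Notes on version B (the rewrite author's own statement) =====
-- stated objective: simpler
-- what changed: Replaced the brute-force search over all single swaps (each checked by rebuilding the string and comparing it with its reversal) by a three-line closed-form criterion: a string that is not already smaller than its reversal can be made so by one swap exactly when it contains two distinct characters; the equivalence is proved in the Lean file.
import Mathlib
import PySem

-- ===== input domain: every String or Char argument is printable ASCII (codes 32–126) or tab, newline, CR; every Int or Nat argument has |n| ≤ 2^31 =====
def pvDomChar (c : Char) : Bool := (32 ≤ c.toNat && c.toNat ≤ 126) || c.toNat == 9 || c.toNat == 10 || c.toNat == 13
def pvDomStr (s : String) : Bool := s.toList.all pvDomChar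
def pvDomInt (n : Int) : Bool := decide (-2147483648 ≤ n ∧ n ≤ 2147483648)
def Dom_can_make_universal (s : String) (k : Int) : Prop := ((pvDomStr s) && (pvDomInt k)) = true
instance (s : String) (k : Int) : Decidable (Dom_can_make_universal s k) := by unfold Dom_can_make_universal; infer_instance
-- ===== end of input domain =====

-- B replaces A's brute-force search over all single swaps by a closed-form
-- criterion (two distinct characters present), proved equivalent below.


-- ===== PORT A =====
-- is_universal(s): s < s[::-1]  (s[::-1] is reverse, PySem.List.slice?_none_none_neg_one;
-- Python's '<' on str is '<' on the char list, per PySem)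
def pvUniv (l : List Char) : Bool := PySem.Chars.strLt l l.reverse

-- s[i]; exact for the in-range indices produced by A's loops
def pvGetC (l : List Char) (i : Int) : Char := (PySem.List.pyGet? l i).getD ' '

-- s_list = list(s); s_list[i], s_list[j] = s_list[j], s_list[i]  (RHS read from the original list)
def pvSwap (l : List Char) (i j : Int) : List Char :=
  PySem.List.pySetD (PySem.List.pySetD l i (pvGetC l j)) j (pvGetC l i)

def can_make_universal (s : String) (k : Int) : String :=
  let l := s.toList
  let n : Int := (l.length : Int)
  if pvUniv l then "YES"
  else if k = 0 then "NO"
  else if n = 1 then "NO"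
  else if l = l.reverse ∧ PySem.Set.len (PySem.Set.ofList l) = 1 then "NO"
  -- palindrome branch: loop over i<j with s[i] != s[j], return "YES" on first universal swap
  else if (decide (l = l.reverse) && decide (1 < PySem.Set.len (PySem.Set.ofList l))) &&
      ((PySem.List.pyRange 0 n 1).any fun i =>
        (PySem.List.pyRange (i+1) n 1).any fun j =>
          (pvGetC l i != pvGetC l j) && pvUniv (pvSwap l i j)) then "YES"
    else if (PySem.List.pyRange 0 n 1).any fun i =>
        (PySem.List.pyRange (i+1) n 1).any fun j => pvUniv (pvSwap l i j) then "YES"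
    else "NO"

-- ===== PORT B =====
def can_make_universal_alt (s : String) (k : Int) : String :=
  let l := s.toList
  if PySem.Chars.strLt l l.reverse then "YES"
  else if k = 0 then "NO"
  else if 1 < PySem.Set.len (PySem.Set.ofList l) then "YES" else "NO"

-- ===== PRECONDITION & SPEC =====
def Spec_can_make_universal (s : String) (k : Int) (out : String) : Prop := out = can_make_universal_alt s k
instance (s : String) (k : Int) (out : String) : Decidable (Spec_can_make_universal s k out) := by unfold Spec_can_make_universal; infer_instance

-- ===== CLAIM (what is proved, stated in full; the proofs are below) =====
def Claim_equal_can_make_universal : Prop := ∀ (s : String) (k : Int), Dom_can_make_universal s k → Spec_can_make_universal s k (can_make_universal s k)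

-- ===== LEMMAS AND PROOFS =====

-- the swap at Nat indices, as a plain set/set
def swapN (l : List Char) (i j : Nat) : List Char :=
  (l.set i (l.getD j ' ')).set j (l.getD i ' ')

theorem pvSwap_natCast (l : List Char) (i j : Nat) :
    pvSwap l (i : Int) (j : Int) = swapN l i j := by
  simp [pvSwap, swapN, pvGetC, PySem.List.pyGet?_natCast, PySem.List.pySetD_natCast,
    List.getD]

theorem pvUniv_iff (l : List Char) : pvUniv l = true ↔ l < l.reverse := by
  simp [pvUniv, PySem.Chars.strLt]

theorem length_swapN (l : List Char) (i j : Nat) : (swapN l i j).length = l.length := by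
  simp [swapN]

theorem getElem_swapN (l : List Char) (i j q : Nat) (hq : q < (swapN l i j).length) :
    (swapN l i j)[q] =
      if j = q then l.getD i ' ' else if i = q then l.getD j ' ' else l[q]'(by
        simpa [length_swapN] using hq) := by
  simp [swapN, List.getElem_set]

-- a string whose first character is smaller than its last is smaller than its reversal
theorem lt_rev_of_ends (t : List Char) (n : Nat) (hn : t.length = n) (h2 : 2 ≤ n)
    (h : t[0]'(by omega) < t[n - 1]'(by omega)) : t < t.reverse := by
  subst hn
  rcases List.eq_nil_or_concat t with rfl | ⟨u, x, rfl⟩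
  · simp at h2
  · cases u with
    | nil => simp at h2
    | cons a u' =>
      simp only [List.concat_eq_append] at h2 h ⊢
      have hlen : (a :: u' ++ [x]).length - 1 = (a :: u').length := by simp
      have hx : (a :: u' ++ [x])[(a :: u' ++ [x]).length - 1]'(by omega) = x := by
        rw [List.getElem_concat_length hlen]
      have ha : (a :: u' ++ [x])[0]'(by omega) = a := by simp
      rw [ha, hx] at h
      have : ((a :: u') ++ [x]).reverse = x :: (a :: u').reverse := by simp
      rw [this]
      exact List.Lex.rel h

-- two distinct characters from a set of size > 1
theorem two_mem_of_setlen (l : List Char) (h : 1 < (PySem.Set.ofList l).length) :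
    ∃ a b, a ∈ l ∧ b ∈ l ∧ a ≠ b := by
  obtain ⟨x, y, r, ht⟩ : ∃ x y r, PySem.Set.ofList l = x :: y :: r := by
    cases h1 : PySem.Set.ofList l with
    | nil => rw [h1] at h; simp at h
    | cons x t =>
      cases t with
      | nil => rw [h1] at h; simp at h
      | cons y r => exact ⟨x, y, r, rfl⟩
  have hnd := PySem.Set.nodup_ofList l
  rw [ht] at hnd
  have hxy : x ≠ y := by
    have := (List.nodup_cons.mp hnd).1
    intro hx; exact this (hx ▸ List.mem_cons_self ..)
  have hx : x ∈ l := (PySem.Set.mem_ofList l x).mp (ht ▸ List.mem_cons_self ..)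
  have hy : y ∈ l := (PySem.Set.mem_ofList l y).mp (ht ▸ List.mem_cons_of_mem _ (List.mem_cons_self ..))
  exact ⟨x, y, hx, hy, hxy⟩

-- index congruence for getElem
theorem getElem_idx_congr (l : List Char) (a b : Nat) (ha : a < l.length) (h : a = b) :
    l[a] = l[b]'(h ▸ ha) := by subst h; rfl

-- the heart of B: a non-universal string with two distinct characters always has a
-- universal single swap
theorem exists_univ_swap (l : List Char) (hnu : ¬ l < l.reverse)
    (hset : 1 < (PySem.Set.ofList l).length) :
    ∃ i j : Nat, i < j ∧ j < l.length ∧ swapN l i j < (swapN l i j).reverse := by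
  obtain ⟨a, b, ha, hb, hab⟩ := two_mem_of_setlen l hset
  have hne : l ≠ [] := by rintro rfl; simp at ha
  obtain ⟨m, hm⟩ := Option.isSome_iff_exists.mp (List.isSome_min?_of_ne_nil hne)
  obtain ⟨hmmem, hmle⟩ := List.min?_eq_some_iff.mp hm
  have hmlt : ∀ q (hq : q < l.length), l[q]'hq ≠ m → m < l[q]'hq :=
    fun q hq hne' => lt_of_le_of_ne (hmle _ (List.getElem_mem hq)) (Ne.symm hne')
  -- I : the first index not holding the minimum
  have hex : ∃ x ∈ l, (x != m) = true := by
    rcases eq_or_ne a m with rfl | hane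
    · exact ⟨b, hb, by simpa using hab.symm⟩
    · exact ⟨a, ha, by simpa using hane⟩
  obtain ⟨I, hIlt, hIne, hIbefore⟩ :
      ∃ I, ∃ (hI : I < l.length), l[I]'hI ≠ m ∧ ∀ q (hq : q < l.length), q < I → l[q]'hq = m := by
    refine ⟨List.findIdx (fun c => c != m) l, List.findIdx_lt_length_of_exists hex, ?_, ?_⟩
    · simpa using @List.findIdx_getElem _ (fun c => c != m) l
        (List.findIdx_lt_length_of_exists hex)
    · intro q hq hlt
      simpa using List.not_of_lt_findIdx hlt
  -- J : the last index holding the minimum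
  obtain ⟨J, hJlt, hJm, hJafter⟩ :
      ∃ J, ∃ (hJ : J < l.length), l[J]'hJ = m ∧ ∀ q (hq : q < l.length), J < q → l[q]'hq ≠ m := by
    have hmrev : ∃ x ∈ l.reverse, (x == m) = true := ⟨m, by simpa using hmmem, by simp⟩
    have hKlt : List.findIdx (fun c => c == m) l.reverse < l.length := by
      simpa using List.findIdx_lt_length_of_exists hmrev
    refine ⟨l.length - 1 - List.findIdx (fun c => c == m) l.reverse, by omega, ?_, ?_⟩
    · have h1 := @List.findIdx_getElem _ (fun c => c == m) l.reverse (by simpa using hKlt)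
      rw [List.getElem_reverse] at h1
      simpa using h1
    · intro q hq hJq
      have hq' : l.length - 1 - q < List.findIdx (fun c => c == m) l.reverse := by omega
      have h2 := List.not_of_lt_findIdx (p := fun c => c == m) (xs := l.reverse) hq'
      rw [List.getElem_reverse] at h2
      rw [getElem_idx_congr l (l.length - 1 - (l.length - 1 - q)) q (by omega) (by omega)] at h2
      simpa using h2
  by_cases hI0 : I = 0
  · -- l[0] ≠ m: swap the last minimum to the front
    subst hI0
    have hJ0 : 0 < J := by
      rcases Nat.eq_zero_or_pos J with h | h
      · subst h; exact absurd hJm hIne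
      · exact h
    refine ⟨0, J, hJ0, hJlt, ?_⟩
    apply lt_rev_of_ends _ l.length (by rw [length_swapN]) (by omega)
    have ht0 : (swapN l 0 J)[0]'(by rw [length_swapN]; omega) = m := by
      rw [getElem_swapN l 0 J 0 (by rw [length_swapN]; omega)]
      rw [if_neg (by omega : ¬ J = 0), if_pos rfl, List.getD_eq_getElem _ _ hJlt]
      exact hJm
    have htl : m < (swapN l 0 J)[l.length - 1]'(by rw [length_swapN]; omega) := by
      rw [getElem_swapN l 0 J (l.length - 1) (by rw [length_swapN]; omega)]
      rcases eq_or_ne J (l.length - 1) with hJn | hJn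
      · rw [if_pos hJn, List.getD_eq_getElem _ _ (by omega : 0 < l.length)]
        exact hmlt 0 (by omega) hIne
      · rw [if_neg hJn, if_neg (by omega : ¬ (0 : Nat) = l.length - 1)]
        exact hmlt (l.length - 1) (by omega) (hJafter (l.length - 1) (by omega) (by omega))
    rw [ht0]; exact htl
  · -- l[0] = m: then l[n-1] = m too (else l would already be universal); swap l[I] to the back
    have h0m : l[0]'(by omega) = m := hIbefore 0 (by omega) (by omega)
    have hn2 : 2 ≤ l.length := by omega
    have hlast : l[l.length - 1]'(by omega) = m := by
      by_contra hne'
      exact hnu (lt_rev_of_ends l l.length rfl hn2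
        (by rw [h0m]; exact hmlt (l.length - 1) (by omega) hne'))
    have hIn1 : I < l.length - 1 := by
      rcases Nat.lt_or_ge I (l.length - 1) with h | h
      · exact h
      · exact absurd (by omega : I = l.length - 1) (fun he => hIne (by rw [getElem_idx_congr l I (l.length - 1) hIlt he]; exact hlast))
    refine ⟨I, l.length - 1, hIn1, by omega, ?_⟩
    apply lt_rev_of_ends _ l.length (by rw [length_swapN]) (by omega)
    have ht0 : (swapN l I (l.length - 1))[0]'(by rw [length_swapN]; omega) = m := by
      rw [getElem_swapN l I (l.length - 1) 0 (by rw [length_swapN]; omega)]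
      rw [if_neg (by omega : ¬ l.length - 1 = 0), if_neg (by omega : ¬ I = 0)]
      exact h0m
    have htl : m < (swapN l I (l.length - 1))[l.length - 1]'(by rw [length_swapN]; omega) := by
      rw [getElem_swapN l I (l.length - 1) (l.length - 1) (by rw [length_swapN]; omega)]
      rw [if_pos rfl, List.getD_eq_getElem _ _ hIlt]
      exact hmlt I hIlt hIne
    rw [ht0]; exact htl

-- the general swap loop of A reports success when a universal swap exists
theorem genAny_true (l : List Char)
    (hex : ∃ i j : Nat, i < j ∧ j < l.length ∧ swapN l i j < (swapN l i j).reverse) :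
    ((PySem.List.pyRange 0 (l.length : Int) 1).any fun i =>
      (PySem.List.pyRange (i+1) (l.length : Int) 1).any fun j =>
        pvUniv (pvSwap l i j)) = true := by
  obtain ⟨i, j, hij, hj, huniv⟩ := hex
  rw [List.any_eq_true]
  refine ⟨(i : Int), PySem.List.mem_pyRange_one.mpr ⟨by positivity, by exact_mod_cast by omega⟩, ?_⟩
  rw [List.any_eq_true]
  refine ⟨(j : Int), PySem.List.mem_pyRange_one.mpr ⟨by exact_mod_cast by omega, by exact_mod_cast hj⟩, ?_⟩
  rw [pvSwap_natCast, pvUniv_iff]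
  exact huniv

-- a set of size 1 means a constant (replicate) list, hence a palindrome
theorem const_of_setlen_one (l : List Char) (hne : l ≠ [])
    (hlen : ¬ 1 < (PySem.Set.ofList l).length) :
    l = l.reverse ∧ (PySem.Set.ofList l).length = 1 := by
  obtain ⟨x, t, rfl⟩ := List.exists_cons_of_ne_nil hne
  have hx : x ∈ PySem.Set.ofList (x :: t) := (PySem.Set.mem_ofList _ x).mpr (List.mem_cons_self ..)
  have h1 : 1 ≤ (PySem.Set.ofList (x :: t)).length := List.length_pos_of_mem hx
  have heq : (PySem.Set.ofList (x :: t)).length = 1 := by omega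
  obtain ⟨c, hc⟩ := List.length_eq_one_iff.mp heq
  have hall : ∀ y ∈ (x :: t), y = c := by
    intro y hy
    have : y ∈ PySem.Set.ofList (x :: t) := (PySem.Set.mem_ofList _ y).mpr hy
    rw [hc] at this; simpa using this
  refine ⟨?_, heq⟩
  refine List.ext_getElem (by simp) ?_
  intro i h1 h2
  rw [List.getElem_reverse]
  have hc1 : (x :: t)[i] = c := hall _ (List.getElem_mem h1)
  have hc2 : (x :: t)[(x :: t).length - 1 - i]'(by omega) = c :=
    hall _ (List.getElem_mem (by omega))
  rw [hc1, hc2]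

-- ===== VERDICT (by name: the statement is the Claim_ definition above) =====
theorem can_make_universal_spec : Claim_equal_can_make_universal := by
  intro s k _
  unfold Spec_can_make_universal can_make_universal can_make_universal_alt
  set l := s.toList with hl
  by_cases hu : pvUniv l = true
  · have hu2 : PySem.Chars.strLt l l.reverse = true := hu
    rw [if_pos hu, if_pos hu2]
  · have hu2 : ¬ PySem.Chars.strLt l l.reverse = true := hu
    have hu' : ¬ l < l.reverse := by simpa [pvUniv, PySem.Chars.strLt] using hu
    rw [if_neg hu, if_neg hu2]
    by_cases hk : k = 0
    · rw [if_pos hk, if_pos hk]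
    · rw [if_neg hk, if_neg hk]
      by_cases hbig : 1 < (PySem.Set.ofList l).length
      · -- B says YES; A's general swap loop finds a universal swap
        have hbig' : (1 : Int) < PySem.Set.len (PySem.Set.ofList l) := by
          simp only [PySem.Set.len]; exact_mod_cast hbig
        have hne1 : ¬ ((l.length : Int) = 1) := by
          have := PySem.Set.length_ofList_le l
          intro h
          have h' : l.length = 1 := by exact_mod_cast h
          omega
        have h4 : ¬ (l = l.reverse ∧ PySem.Set.len (PySem.Set.ofList l) = 1) := by
          rintro ⟨-, h⟩
          simp only [PySem.Set.len] at h
          have h' : (PySem.Set.ofList l).length = 1 := by exact_mod_cast h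
          omega
        have hgen := genAny_true l (exists_univ_swap l hu' hbig)
        rw [if_neg hne1, if_neg h4, if_pos hbig']
        simp [hgen]
      · -- B says NO; A returns "NO" in one of its early branches
        have hbig' : ¬ (1 : Int) < PySem.Set.len (PySem.Set.ofList l) := by
          simp only [PySem.Set.len]; exact_mod_cast hbig
        rw [if_neg hbig']
        rcases eq_or_ne l [] with hnil | hne
        · rw [hnil]
          decide
        · obtain ⟨hpal, hone⟩ := const_of_setlen_one l hne hbig
          by_cases hn1 : (l.length : Int) = 1
          · rw [if_pos hn1]
          · have hone' : PySem.Set.len (PySem.Set.ofList l) = 1 := by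
              simp only [PySem.Set.len]; exact_mod_cast hone
            rw [if_neg hn1, if_pos ⟨hpal, hone'⟩]
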